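-- pv_equiv track=rewrite | github.com/hbinl/hbinl-scripts | FIT2004/Week05/Q6.py | minima
-- ===== SOURCE A (Python) =====
-- def minima(x0,x1,x2):
--     # -1 means no link
--     # 0 means diagonal
--     # 1 means up
--     # 2 means left
--     x = min(x0,x1,x2)
--     lst = [x0,x1,x2]
--     idx = -1
--     for i in range(3):
--         if lst[i] == x:
--             idx = i
--             break
--     return [x, idx]
-- ===== SOURCE B (Python) =====
-- def minima(x0, x1, x2):
--     best, idx = x0, 0
--     for i, v in ((1, x1), (2, x2)):
--         if v < best:
--             best, idx = v, i
--     return [best, idx]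
-- ===== Notes on version B (the rewrite author's own statement) =====
-- stated objective: simpler
-- what changed: Single left-to-right pass maintaining the running minimum and its earliest index with strict '<' updates, replacing A's min()-then-separate-index-scan two-phase structure.
import Mathlib
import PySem

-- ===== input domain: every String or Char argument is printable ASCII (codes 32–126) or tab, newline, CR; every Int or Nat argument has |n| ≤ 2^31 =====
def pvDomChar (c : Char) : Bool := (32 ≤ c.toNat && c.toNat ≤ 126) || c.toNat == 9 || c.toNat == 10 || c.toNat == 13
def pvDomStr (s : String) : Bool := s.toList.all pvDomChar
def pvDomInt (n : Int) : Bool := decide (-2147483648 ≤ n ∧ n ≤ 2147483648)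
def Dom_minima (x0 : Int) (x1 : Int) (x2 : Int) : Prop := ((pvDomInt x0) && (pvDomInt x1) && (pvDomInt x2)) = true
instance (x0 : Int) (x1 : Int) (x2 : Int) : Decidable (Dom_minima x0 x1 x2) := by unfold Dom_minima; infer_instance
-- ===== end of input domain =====

-- B replaces A's min()-then-index-scan with one pass keeping the running minimum and its earliest index (simpler decomposition; return value only).

-- ===== PORT A =====
-- the for-i loop with break: first index whose element equals x, else the initial -1
def pvFindIdxA (x : Int) (lst : List Int) (i : Int) : Int :=
  match lst with
  | [] => -1
  | y :: ys => if y == x then i else pvFindIdxA x ys (i + 1)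

def minima (x0 : Int) (x1 : Int) (x2 : Int) : List Int :=
  let x := min x0 (min x1 x2)
  let lst := [x0, x1, x2]
  let idx := pvFindIdxA x lst 0
  [x, idx]

-- ===== PORT B =====
def minima_alt (x0 : Int) (x1 : Int) (x2 : Int) : List Int :=
  let r := [((1 : Int), x1), (2, x2)].foldl
    (fun s p => if p.2 < s.1 then (p.2, p.1) else s) (x0, (0 : Int))
  [r.1, r.2]

-- ===== PRECONDITION & SPEC =====
def Spec_minima (x0 : Int) (x1 : Int) (x2 : Int) (out : List Int) : Prop := out = minima_alt x0 x1 x2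
instance (x0 : Int) (x1 : Int) (x2 : Int) (out : List Int) : Decidable (Spec_minima x0 x1 x2 out) := by unfold Spec_minima; infer_instance

-- ===== CLAIM (what is proved, stated in full; the proofs are below) =====
def Claim_equal_minima : Prop := ∀ (x0 : Int) (x1 : Int) (x2 : Int), Dom_minima x0 x1 x2 → Spec_minima x0 x1 x2 (minima x0 x1 x2)

-- ===== LEMMAS AND PROOFS =====

-- ===== VERDICT (by name: the statement is the Claim_ definition above) =====
theorem minima_spec : Claim_equal_minima := by
  intro x0 x1 x2 _
  unfold Spec_minima minima minima_alt pvFindIdxA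
  simp only [List.foldl, min_def, beq_iff_eq]
  split_ifs <;> simp_all [pvFindIdxA] <;> omega
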